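-- pv_equiv track=rewrite | github.com/vijayshc/parsesql | lineage/utils.py | guess_table_from_prefix
-- ===== SOURCE A (Python) =====
-- from typing import Dict, Iterable, Optional, Sequence
--
-- def normalize_identifier(name: Optional[str]) -> Optional[str]:
--     if name is None:
--         return None
--     return str(name).strip().strip("`").strip('"').lower()
--
-- TPCDS_PREFIX_TABLES = {
--     "ss_": "store_sales",
--     "sr_": "store_returns",
--     "cs_": "catalog_sales",
--     "ws_": "web_sales",
--     "i_": "item",
--     "d_": "date_dim",
--     "c_": "customer",
--     "ca_": "customer_address",
--     "s_": "store",
-- }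
--
-- GENERIC_PREFIX_TABLES = {
--     "o_": "orders",
--     "oi_": "order_items",
--     "p_": "products",
-- }
--
-- def guess_table_from_prefix(column_name: Optional[str], candidate_tables: Sequence[str]) -> Optional[str]:
--     if not column_name:
--         return None
--     col = normalize_identifier(column_name) or ""
--     pref_map = {**TPCDS_PREFIX_TABLES, **GENERIC_PREFIX_TABLES}
--     # Prefer longer prefixes first (e.g., 'oi_' before 'o_')
--     for pref, table in sorted(pref_map.items(), key=lambda x: -len(x[0])):
--         if col.startswith(pref) and any(ct.endswith(table) or ct == table for ct in candidate_tables):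
--             return table
--     return None
-- ===== SOURCE B (Python) =====
-- from typing import Optional, Sequence
--
-- # One merged prefix->table map (GENERIC after TPCDS, as in A's {**a, **b}); since every
-- # prefix ends at the column's first underscore, a single direct lookup replaces A's
-- # sort + linear scan over all prefixes.
-- _TABLE_BY_PREFIX = {
--     "ss_": "store_sales",
--     "sr_": "store_returns",
--     "cs_": "catalog_sales",
--     "ws_": "web_sales",
--     "i_": "item",
--     "d_": "date_dim",
--     "c_": "customer",
--     "ca_": "customer_address",
--     "s_": "store",
--     "o_": "orders",
--     "oi_": "order_items",
--     "p_": "products",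
-- }
--
-- def guess_table_from_prefix(column_name: Optional[str], candidate_tables: Sequence[str]) -> Optional[str]:
--     if not column_name:
--         return None
--     col = column_name.strip().strip("`").strip('"').lower()
--     i = col.find("_")
--     if i < 0:
--         return None
--     table = _TABLE_BY_PREFIX.get(col[:i + 1])
--     if table is None:
--         return None
--     if any(ct.endswith(table) or ct == table for ct in candidate_tables):
--         return table
--     return None
-- ===== Notes on version B (the rewrite author's own statement) =====
-- stated objective: simpler
-- what changed: A sorts all 12 prefixes longest-first and scans them with startswith; B derives the column's single possible prefix (text up to and including the first underscore) and does one direct dict lookup, which is equivalent because every prefix ends with '_'.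
import Mathlib
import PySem

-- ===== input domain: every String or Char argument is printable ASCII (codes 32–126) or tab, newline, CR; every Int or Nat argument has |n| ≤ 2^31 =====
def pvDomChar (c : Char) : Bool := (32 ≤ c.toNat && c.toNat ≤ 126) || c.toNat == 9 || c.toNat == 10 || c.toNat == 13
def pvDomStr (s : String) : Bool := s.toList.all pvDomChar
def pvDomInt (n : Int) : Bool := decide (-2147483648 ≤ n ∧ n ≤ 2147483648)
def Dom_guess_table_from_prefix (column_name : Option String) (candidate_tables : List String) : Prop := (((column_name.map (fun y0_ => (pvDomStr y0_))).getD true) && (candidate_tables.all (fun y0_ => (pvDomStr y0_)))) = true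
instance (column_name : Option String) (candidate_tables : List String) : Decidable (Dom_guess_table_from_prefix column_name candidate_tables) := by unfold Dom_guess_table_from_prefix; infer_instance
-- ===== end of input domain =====

-- B replaces A's sort of all prefixes + longest-first startswith scan by one direct dict lookup of
-- the column's only possible prefix (its text up to and including the first '_'); objective: simpler.

-- ===== PORT A =====
def pvTPCDS : PySem.Dict String String := PySem.Dict.ofList [("ss_","store_sales"),("sr_","store_returns"),("cs_","catalog_sales"),("ws_","web_sales"),("i_","item"),("d_","date_dim"),("c_","customer"),("ca_","customer_address"),("s_","store")]
def pvGENERIC : PySem.Dict String String := PySem.Dict.ofList [("o_","orders"),("oi_","order_items"),("p_","products")]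

def normalize_identifier : Option String → Option String
  | none => none
  | some name => some (PySem.Str.lower (PySem.Str.stripChars (PySem.Str.stripChars (PySem.Str.strip name) "`") "\""))

-- the 'for pref, table in …: if …: return table' loop
def pvScanA (col : String) (cts : List String) : List (String × String) → Option String
  | [] => none
  | (pref, table) :: rest =>
      if PySem.Str.startswith col pref && cts.any (fun ct => PySem.Str.endswith ct table || ct == table)
      then some table else pvScanA col cts rest

def guess_table_from_prefix (column_name : Option String) (candidate_tables : List String) : Option String :=
  match column_name with
  | none => none
  | some s =>
    if s == "" then none
    else
      let col := (normalize_identifier (some s)).getD ""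
      let pref_map := pvGENERIC.items.foldl (fun d kv => d.insert kv.1 kv.2) pvTPCDS
      pvScanA col candidate_tables (PySem.List.sorted pref_map.items (fun x => -(PySem.Str.len x.1)) false)

-- ===== PORT B =====
def pvTableByPrefix : PySem.Dict String String := PySem.Dict.ofList [("ss_","store_sales"),("sr_","store_returns"),("cs_","catalog_sales"),("ws_","web_sales"),("i_","item"),("d_","date_dim"),("c_","customer"),("ca_","customer_address"),("s_","store"),("o_","orders"),("oi_","order_items"),("p_","products")]

def guess_table_from_prefix_alt (column_name : Option String) (candidate_tables : List String) : Option String :=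
  match column_name with
  | none => none
  | some s =>
    if s == "" then none
    else
      let col := PySem.Str.lower (PySem.Str.stripChars (PySem.Str.stripChars (PySem.Str.strip s) "`") "\"")
      let i := PySem.Str.find col "_"
      if i < 0 then none
      else
        match pvTableByPrefix.get? (PySem.Str.slice col none (some (i+1))) with
        | none => none
        | some table =>
          if candidate_tables.any (fun ct => PySem.Str.endswith ct table || ct == table) then some table
          else none

-- ===== PRECONDITION & SPEC =====
def Spec_guess_table_from_prefix (column_name : Option String) (candidate_tables : List String) (out : Option String) : Prop := out = guess_table_from_prefix_alt column_name candidate_tables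
instance (column_name : Option String) (candidate_tables : List String) (out : Option String) : Decidable (Spec_guess_table_from_prefix column_name candidate_tables out) := by unfold Spec_guess_table_from_prefix; infer_instance

-- ===== CLAIM (what is proved, stated in full; the proofs are below) =====
def Claim_equal_guess_table_from_prefix : Prop := ∀ (column_name : Option String) (candidate_tables : List String), Dom_guess_table_from_prefix column_name candidate_tables → Spec_guess_table_from_prefix column_name candidate_tables (guess_table_from_prefix column_name candidate_tables)

-- ===== LEMMAS AND PROOFS =====
-- A's sorted prefix list, evaluated once (longer prefixes first, stable within a length)
theorem pvSortedLit : PySem.List.sorted (pvGENERIC.items.foldl (fun d kv => d.insert kv.1 kv.2) pvTPCDS).items (fun x => -(PySem.Str.len x.1)) false = [("ss_","store_sales"),("sr_","store_returns"),("cs_","catalog_sales"),("ws_","web_sales"),("ca_","customer_address"),("oi_","order_items"),("i_","item"),("d_","date_dim"),("c_","customer"),("s_","store"),("o_","orders"),("p_","products")] := by decide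

-- if col has no '_', no prefix containing '_' can start it
theorem pvSwFalse (col p : String) (hi : PySem.Str.find col "_" < 0) (hp : '_' ∈ p.toList) :
    PySem.Str.startswith col p = false := by
  have h1 : PySem.Str.find col "_" = -1 := le_antisymm (by omega) (by simpa using PySem.Chars.neg_one_le_find col.toList "_".toList)
  have h2 : ¬ (['_'] <:+: col.toList) := by
    have := (PySem.Chars.find_eq_neg_one_iff col.toList "_".toList).mp (by simpa using h1)
    simpa using this
  cases hb : PySem.Str.startswith col p with
  | false => rfl
  | true =>
    have hpre : p.toList <+: col.toList := (PySem.Chars.startswith_iff _ _).mp (by simpa using hb)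
    exact absurd ((List.singleton_infix_iff '_' col.toList).mpr (hpre.subset hp)) h2

theorem pvSwKey (col p : String) (q : List Char) (hp : p.toList = q ++ ['_']) (hq : '_' ∉ q)
    (hi : 0 ≤ PySem.Str.find col "_") :
    PySem.Str.startswith col p = (PySem.Str.slice col none (some (PySem.Str.find col "_" + 1)) == p) := by
  have hfind : 0 ≤ PySem.Chars.find col.toList ['_'] := by simpa using hi
  obtain ⟨hpre, hmin⟩ := PySem.Chars.find_spec hfind
  have hslice : (PySem.Str.slice col none (some (PySem.Str.find col "_" + 1))).toList
      = col.toList.take ((PySem.Chars.find col.toList ['_']).toNat + 1) := by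
    rw [PySem.Str.toList_slice]
    have h1 : PySem.Str.find col "_" = PySem.Chars.find col.toList ['_'] := by
      simp [PySem.Str.find_eq]
    rw [h1]
    simp only [PySem.Chars.slice_eq_listSlice]
    rw [PySem.List.slice_to col.toList (b := PySem.Chars.find col.toList ['_'] + 1) (by omega)]
    congr 1
    omega
  have hiff : (PySem.Str.startswith col p = true) ↔ ((PySem.Str.slice col none (some (PySem.Str.find col "_" + 1)) == p) = true) := by
    rw [beq_iff_eq, ← String.toList_inj, hslice]
    simp only [PySem.Str.startswith_eq]
    rw [PySem.Chars.startswith_iff]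
    generalize hn : (PySem.Chars.find col.toList ['_']).toNat = n at hpre hmin
    constructor
    · rintro ⟨r, hr⟩
      rw [hp] at hr
      have hr' : col.toList = q ++ '_' :: r := by rw [← hr]; simp
      have hA : ['_'] <+: col.toList.drop q.length := by
        rw [hr']
        simp
      have hle : n ≤ q.length := by
        by_contra h'
        exact hmin q.length (by omega) hA
      have hge : ¬ n < q.length := by
        intro h'
        obtain ⟨t, ht⟩ := hpre
        rw [hr', List.drop_append_of_le_length (le_of_lt h'), List.drop_eq_getElem_cons h',
            List.cons_append] at ht
        have hc : '_' = q[n] := (List.cons_eq_cons.mp ht).1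
        exact hq (by rw [hc]; exact List.getElem_mem h')
      have hqn : n = q.length := by omega
      rw [hqn, hr', hp, List.take_append]
      simp
    · intro h
      rw [← h]
      exact List.take_prefix _ _
  exact Bool.coe_iff_coe.mp hiff

theorem pvD : pvTableByPrefix = PySem.Dict.mk [("ss_","store_sales"),("sr_","store_returns"),("cs_","catalog_sales"),("ws_","web_sales"),("i_","item"),("d_","date_dim"),("c_","customer"),("ca_","customer_address"),("s_","store"),("o_","orders"),("oi_","order_items"),("p_","products")] := by decide

theorem pvCore (col : String) (cts : List String) :
    pvScanA col cts [("ss_","store_sales"),("sr_","store_returns"),("cs_","catalog_sales"),("ws_","web_sales"),("ca_","customer_address"),("oi_","order_items"),("i_","item"),("d_","date_dim"),("c_","customer"),("s_","store"),("o_","orders"),("p_","products")] =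
    (if PySem.Str.find col "_" < 0 then none
     else match pvTableByPrefix.get? (PySem.Str.slice col none (some (PySem.Str.find col "_" + 1))) with
       | none => none
       | some table => if cts.any (fun ct => PySem.Str.endswith ct table || ct == table) then some table else none) := by
  by_cases hi : PySem.Str.find col "_" < 0
  · rw [if_pos hi]
    have f1 := pvSwFalse col "ss_" hi (by decide)
    have f2 := pvSwFalse col "sr_" hi (by decide)
    have f3 := pvSwFalse col "cs_" hi (by decide)
    have f4 := pvSwFalse col "ws_" hi (by decide)
    have f5 := pvSwFalse col "ca_" hi (by decide)
    have f6 := pvSwFalse col "oi_" hi (by decide)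
    have f7 := pvSwFalse col "i_" hi (by decide)
    have f8 := pvSwFalse col "d_" hi (by decide)
    have f9 := pvSwFalse col "c_" hi (by decide)
    have f10 := pvSwFalse col "s_" hi (by decide)
    have f11 := pvSwFalse col "o_" hi (by decide)
    have f12 := pvSwFalse col "p_" hi (by decide)
    simp only [pvScanA, f1, f2, f3, f4, f5, f6, f7, f8, f9, f10, f11, f12]
    simp
  · replace hi : 0 ≤ PySem.Str.find col "_" := by omega
    rw [if_neg (by omega)]
    have e1 := pvSwKey col "ss_" ['s','s'] (by decide) (by decide) hi
    have e2 := pvSwKey col "sr_" ['s','r'] (by decide) (by decide) hi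
    have e3 := pvSwKey col "cs_" ['c','s'] (by decide) (by decide) hi
    have e4 := pvSwKey col "ws_" ['w','s'] (by decide) (by decide) hi
    have e5 := pvSwKey col "ca_" ['c','a'] (by decide) (by decide) hi
    have e6 := pvSwKey col "oi_" ['o','i'] (by decide) (by decide) hi
    have e7 := pvSwKey col "i_" ['i'] (by decide) (by decide) hi
    have e8 := pvSwKey col "d_" ['d'] (by decide) (by decide) hi
    have e9 := pvSwKey col "c_" ['c'] (by decide) (by decide) hi
    have e10 := pvSwKey col "s_" ['s'] (by decide) (by decide) hi
    have e11 := pvSwKey col "o_" ['o'] (by decide) (by decide) hi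
    have e12 := pvSwKey col "p_" ['p'] (by decide) (by decide) hi
    simp only [pvScanA, e1, e2, e3, e4, e5, e6, e7, e8, e9, e10, e11, e12]
    set k := PySem.Str.slice col none (some (PySem.Str.find col "_" + 1)) with hk
    by_cases h1 : k = "ss_"
    · simp [h1, pvD, PySem.Dict.get?_mk_cons]
    by_cases h2 : k = "sr_"
    · simp [h2, pvD, PySem.Dict.get?_mk_cons]
    by_cases h3 : k = "cs_"
    · simp [h3, pvD, PySem.Dict.get?_mk_cons]
    by_cases h4 : k = "ws_"
    · simp [h4, pvD, PySem.Dict.get?_mk_cons]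
    by_cases h5 : k = "ca_"
    · simp [h5, pvD, PySem.Dict.get?_mk_cons]
    by_cases h6 : k = "oi_"
    · simp [h6, pvD, PySem.Dict.get?_mk_cons]
    by_cases h7 : k = "i_"
    · simp [h7, pvD, PySem.Dict.get?_mk_cons]
    by_cases h8 : k = "d_"
    · simp [h8, pvD, PySem.Dict.get?_mk_cons]
    by_cases h9 : k = "c_"
    · simp [h9, pvD, PySem.Dict.get?_mk_cons]
    by_cases h10 : k = "s_"
    · simp [h10, pvD, PySem.Dict.get?_mk_cons]
    by_cases h11 : k = "o_"
    · simp [h11, pvD, PySem.Dict.get?_mk_cons]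
    by_cases h12 : k = "p_"
    · simp [h12, pvD, PySem.Dict.get?_mk_cons]
    · simp [pvD, PySem.Dict.get?, h1, h2, h3, h4, h5, h6, h7, h8, h9, h10, h11, h12, Ne.symm h1, Ne.symm h2, Ne.symm h3, Ne.symm h4, Ne.symm h5, Ne.symm h6, Ne.symm h7, Ne.symm h8, Ne.symm h9, Ne.symm h10, Ne.symm h11, Ne.symm h12]

-- ===== VERDICT (by name: the statement is the Claim_ definition above) =====
theorem guess_table_from_prefix_spec : Claim_equal_guess_table_from_prefix := by
  unfold Claim_equal_guess_table_from_prefix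
  intro cn cts _
  unfold Spec_guess_table_from_prefix
  cases cn with
  | none => rfl
  | some s =>
    cases hb : (s == "") with
    | true => simp [guess_table_from_prefix, guess_table_from_prefix_alt, hb]
    | false =>
      simp only [guess_table_from_prefix, guess_table_from_prefix_alt, hb, Bool.false_eq_true,
        if_false, normalize_identifier, Option.getD]
      rw [pvSortedLit, pvCore]
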